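-- pv_equiv track=rewrite | github.com/ElizabethAluko/Connect-to-Course | functionalties.py | search_courses
-- ===== SOURCE A (Python) =====
-- def search_courses(courses_list, search_str):
--     """search for course related to search string
--        return list of searches
--     """
--     searches = []
--     for course in courses_list:
--         if all(item in [x.upper() for x in course.split(" ")]
--                for item in [x.upper() for x in search_str.split(" ")]):
--             searches.append(course)
--         elif any(item in [x.upper() for x in course.split(" ")]
--                for item in [x.upper() for x in search_str.split(" ")]):
--             searches.append(course)
--         else:
--             searches = searches
--
--     return searches
-- ===== SOURCE B (Python) =====
-- def search_courses(courses_list, search_str):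
--     """search for course related to search string
--        return list of searches
--     """
--     # Stage 1: inverted index from uppercased word -> list of course positions.
--     pairs = [(w.upper(), i)
--              for i, course in enumerate(courses_list)
--              for w in course.split(" ")]
--     index = {}
--     for key, i in pairs:
--         index[key] = index.get(key, []) + [i]
--     # Stage 2: union of posting lists of the search words.
--     hits = set()
--     for w in search_str.split(" "):
--         hits.update(index.get(w.upper(), []))
--     # Stage 3: emit courses at the hit positions, in original order.
--     return [course for i, course in enumerate(courses_list) if i in hits]
-- ===== Notes on version B (the rewrite author's own statement) =====
-- stated objective: faster
-- what changed: Replaced A's single pass with per-course all/elif-any membership scans over the search words (rebuilding both uppercased word lists per check) by a staged inverted-index algorithm: one pass builds a word-to-positions index, the search words' posting lists are unioned into a hit set, and a final pass emits courses at hit positions in order.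
import Mathlib
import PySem

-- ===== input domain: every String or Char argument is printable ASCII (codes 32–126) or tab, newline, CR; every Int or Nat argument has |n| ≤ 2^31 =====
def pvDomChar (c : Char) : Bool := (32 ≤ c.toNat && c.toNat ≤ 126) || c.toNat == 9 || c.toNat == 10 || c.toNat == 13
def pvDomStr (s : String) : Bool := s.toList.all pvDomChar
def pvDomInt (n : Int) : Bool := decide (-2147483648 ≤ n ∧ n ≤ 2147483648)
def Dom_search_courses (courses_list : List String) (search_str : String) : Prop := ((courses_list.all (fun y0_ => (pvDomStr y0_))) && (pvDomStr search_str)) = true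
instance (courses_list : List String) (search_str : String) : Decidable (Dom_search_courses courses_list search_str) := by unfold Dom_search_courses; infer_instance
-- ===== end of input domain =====

-- B replaces A's per-course all/elif-any membership scans by a staged inverted index:
-- one pass builds word -> positions, the search words' posting lists are unioned into a
-- hit set, and courses at hit positions are emitted in order (alternative decomposition).


-- ===== PORT A =====
-- [x.upper() for x in s.split(" ")]  (exact: splitOn with one-char separator, ASCII upper)
def pvUpWords (s : String) : List (List Char) :=
  (PySem.Chars.splitOn s.toList [' ']).map PySem.Chars.upper

def search_courses (courses_list : List String) (search_str : String) : List String :=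
  courses_list.foldl (fun searches course =>
    if (pvUpWords search_str).all (fun item => (pvUpWords course).contains item) then
      searches ++ [course]
    else if (pvUpWords search_str).any (fun item => (pvUpWords course).contains item) then
      searches ++ [course]
    else
      searches) []

-- ===== PORT B =====
def search_courses_alt (courses_list : List String) (search_str : String) : List String :=
  -- pairs = [(w.upper(), i) for i, course in enumerate(courses_list) for w in course.split(" ")]
  let pairs := (PySem.List.enumerate courses_list).flatMap
      (fun p => (pvUpWords p.2).map (fun w => (w, p.1)))
  -- index[key] = index.get(key, []) + [i]
  let index := pairs.foldl (fun d q => d.modify q.1 ([] : List Int) (· ++ [q.2])) PySem.Dict.empty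
  -- hits.update(index.get(w.upper(), []))
  let hits := (pvUpWords search_str).foldl
      (fun s w => PySem.Set.update s (index.getD w [])) (PySem.Set.empty : PySem.Set Int)
  -- [course for i, course in enumerate(courses_list) if i in hits]
  (PySem.List.enumerate courses_list).foldl
    (fun acc p => if hits.contains p.1 then acc ++ [p.2] else acc) []

-- ===== PRECONDITION & SPEC =====
def Spec_search_courses (courses_list : List String) (search_str : String) (out : List String) : Prop := out = search_courses_alt courses_list search_str
instance (courses_list : List String) (search_str : String) (out : List String) : Decidable (Spec_search_courses courses_list search_str out) := by unfold Spec_search_courses; infer_instance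

-- ===== CLAIM (what is proved, stated in full; the proofs are below) =====
def Claim_equal_search_courses : Prop := ∀ (courses_list : List String) (search_str : String), Dom_search_courses courses_list search_str → Spec_search_courses courses_list search_str (search_courses courses_list search_str)

-- ===== LEMMAS AND PROOFS =====

-- the common per-course condition: some uppercased search word occurs among the course's words
def pvCond (search_str course : String) : Bool :=
  (pvUpWords search_str).any (fun w => (pvUpWords course).contains w)

-- splitOn never returns the empty list (so search_str always yields at least one word)
lemma splitOn_go_ne_nil (sep : List Char) :
    ∀ (fuel : Nat) (l cur : List Char) (acc : List (List Char)),
      PySem.Chars.splitOn.go sep fuel l cur acc ≠ [] := by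
  intro fuel
  induction fuel with
  | zero => intro l cur acc; simp [PySem.Chars.splitOn.go]
  | succ n ih =>
    intro l cur acc
    cases l with
    | nil => simp [PySem.Chars.splitOn.go]
    | cons c rest =>
      simp only [PySem.Chars.splitOn.go]
      split
      · exact ih _ _ _
      · exact ih _ _ _

lemma pvUpWords_ne_nil (s : String) : pvUpWords s ≠ [] := by
  unfold pvUpWords PySem.Chars.splitOn
  simp only [ne_eq, List.map_eq_nil_iff]
  exact splitOn_go_ne_nil _ _ _ _ _

-- A's per-course test (all, else any) is just "any" since the search word list is nonempty
lemma cond_eq (course search_str : String) :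
    ((pvUpWords search_str).all (fun item => (pvUpWords course).contains item)
      || (pvUpWords search_str).any (fun item => (pvUpWords course).contains item))
    = pvCond search_str course := by
  have hne := pvUpWords_ne_nil search_str
  unfold pvCond
  rw [Bool.eq_iff_iff]
  simp only [Bool.or_eq_true, List.all_eq_true, List.any_eq_true]
  constructor
  · rintro (hall | h)
    · obtain ⟨w, hw⟩ := List.exists_mem_of_ne_nil _ hne
      exact ⟨w, hw, hall w hw⟩
    · exact h
  · exact Or.inr

-- A is a filter by pvCond
lemma A_eq_filter (courses_list : List String) (search_str : String) :
    search_courses courses_list search_str = courses_list.filter (pvCond search_str) := by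
  unfold search_courses
  have hstep : (fun (searches : List String) (course : String) =>
      if (pvUpWords search_str).all (fun item => (pvUpWords course).contains item) then
        searches ++ [course]
      else if (pvUpWords search_str).any (fun item => (pvUpWords course).contains item) then
        searches ++ [course]
      else searches)
    = (fun searches course =>
        if pvCond search_str course then searches ++ [course] else searches) := by
    funext searches course
    rw [← cond_eq course search_str]
    cases h1 : (pvUpWords search_str).all (fun item => (pvUpWords course).contains item) <;>
      cases h2 : (pvUpWords search_str).any (fun item => (pvUpWords course).contains item) <;>
      simp
  rw [hstep]
  simpa using PySem.List.foldl_append_if_eq_filter (pvCond search_str) courses_list []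

-- membership in the union-of-posting-lists fold
lemma mem_foldl_update (g : List Char → List Int) :
    ∀ (ws : List (List Char)) (s0 : PySem.Set Int) (i : Int),
      i ∈ ws.foldl (fun s w => PySem.Set.update s (g w)) s0 ↔ i ∈ s0 ∨ ∃ w ∈ ws, i ∈ g w := by
  intro ws
  induction ws with
  | nil => simp
  | cons w ws ih =>
    intro s0 i
    simp only [List.foldl_cons, ih, PySem.Set.mem_update, List.mem_cons]
    constructor
    · rintro ((h | h) | ⟨v, hv, hi⟩)
      · exact Or.inl h
      · exact Or.inr ⟨w, Or.inl rfl, h⟩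
      · exact Or.inr ⟨v, Or.inr hv, hi⟩
    · rintro (h | ⟨v, (rfl | hv), hi⟩)
      · exact Or.inl (Or.inl h)
      · exact Or.inl (Or.inr hi)
      · exact Or.inr ⟨v, hv, hi⟩

-- the index's posting list for w contains exactly the i with (w, i) among the pairs
lemma mem_index (pairs : List (List Char × Int)) (w : List Char) (i : Int) :
    i ∈ (pairs.foldl (fun d q => d.modify q.1 ([] : List Int) (· ++ [q.2]))
          PySem.Dict.empty).getD w [] ↔ (w, i) ∈ pairs := by
  rw [PySem.Dict.getD_foldl_modify_append]
  simp only [PySem.Dict.getD_empty, List.nil_append, List.mem_map, List.mem_filter,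
    beq_iff_eq]
  constructor
  · rintro ⟨⟨w', i'⟩, ⟨hmem, rfl⟩, rfl⟩
    exact hmem
  · intro h
    exact ⟨(w, i), ⟨h, rfl⟩, rfl⟩

-- (w, k) is a pair iff k is the position of a course containing w
lemma mem_pairs (courses_list : List String) (w : List Char) (i : Int) :
    (w, i) ∈ (PySem.List.enumerate courses_list).flatMap
        (fun p => (pvUpWords p.2).map (fun w => (w, p.1)))
      ↔ ∃ (k : Nat) (h : k < courses_list.length), i = k ∧ w ∈ pvUpWords courses_list[k] := by
  simp only [List.mem_flatMap, PySem.List.mem_enumerate_iff, List.mem_map]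
  constructor
  · rintro ⟨p, ⟨k, hk, rfl⟩, v, hv, heq⟩
    obtain ⟨rfl, rfl⟩ := Prod.mk.injEq .. ▸ heq
    refine ⟨k, hk, by simp, hv⟩
  · rintro ⟨k, hk, rfl, hv⟩
    exact ⟨((0 : Int) + k, courses_list[k]), ⟨k, hk, rfl⟩, w, hv, by simp⟩

-- the comprehension over enumerate, driven by a predicate on positions, is a filter
lemma enum_loop (F : Int → Bool) (g : String → Bool) :
    ∀ (xs : List String) (s : Int) (acc : List String),
      (∀ (k : Nat) (h : k < xs.length), F (s + k) = g xs[k]) →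
      (PySem.List.enumerate xs s).foldl
        (fun acc p => if F p.1 then acc ++ [p.2] else acc) acc = acc ++ xs.filter g := by
  intro xs
  induction xs with
  | nil => intro s acc _; simp [PySem.List.enumerate_nil]
  | cons x xs ih =>
    intro s acc h
    rw [PySem.List.enumerate_cons, List.foldl_cons]
    have h0 : F s = g x := by simpa using h 0 (by simp)
    have hrest : ∀ (k : Nat) (hk : k < xs.length), F (s + 1 + k) = g xs[k] := by
      intro k hk
      have := h (k + 1) (by simpa using Nat.succ_lt_succ hk)
      simpa [add_assoc, add_comm, add_left_comm] using this
    rw [ih (s + 1) _ hrest]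
    simp only [h0, List.filter_cons]
    split <;> simp

-- ===== VERDICT (by name: the statement is the Claim_ definition above) =====
theorem search_courses_spec : Claim_equal_search_courses := by
  intro courses_list search_str _
  unfold Spec_search_courses search_courses_alt
  rw [A_eq_filter]
  rw [enum_loop _ (pvCond search_str) courses_list 0 []]
  · simp
  · intro k hk
    rw [Bool.eq_iff_iff, PySem.Set.contains_iff, mem_foldl_update]
    unfold pvCond
    simp only [PySem.Set.empty, List.not_mem_nil, false_or, List.any_eq_true,
      List.contains_iff_mem, mem_index, mem_pairs]
    constructor
    · rintro ⟨w, hw, j, hj, hkj, hmem⟩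
      have : j = k := by omega
      subst this
      exact ⟨w, hw, hmem⟩
    · rintro ⟨w, hw, hmem⟩
      exact ⟨w, hw, k, hk, by simp, hmem⟩
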